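-- pv_equiv track=rewrite | github.com/ElouanR/Advent-Of-Code-2023 | Day 07/Part 1/main.py | is_fullH
-- ===== SOURCE A (Python) =====
-- def is_fullH(line):
--     char_counts = {}
--
--     for char in line:
--         if char in char_counts:
--             char_counts[char] += 1
--         else:
--             char_counts[char] = 1
--
--     result = 3 in char_counts.values() and 2 in char_counts.values()
--
--     return result
-- ===== SOURCE B (Python) =====
-- def _run_lengths(cs):
--     # run lengths of consecutive equal elements (cs sorted => one run per distinct char)
--     if not cs:
--         return []
--     k = 0
--     while k < len(cs) and cs[k] == cs[0]:
--         k += 1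
--     return [k] + _run_lengths(cs[k:])
--
-- def is_fullH(line):
--     lengths = _run_lengths(sorted(line))
--     return 3 in lengths and 2 in lengths
-- ===== Notes on version B (the rewrite author's own statement) =====
-- stated objective: alternative
-- what changed: Replaces the hash-based frequency dictionary by sorting the characters and scanning contiguous equal runs, collecting run lengths and testing membership of 3 and 2 in them.
import Mathlib
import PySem

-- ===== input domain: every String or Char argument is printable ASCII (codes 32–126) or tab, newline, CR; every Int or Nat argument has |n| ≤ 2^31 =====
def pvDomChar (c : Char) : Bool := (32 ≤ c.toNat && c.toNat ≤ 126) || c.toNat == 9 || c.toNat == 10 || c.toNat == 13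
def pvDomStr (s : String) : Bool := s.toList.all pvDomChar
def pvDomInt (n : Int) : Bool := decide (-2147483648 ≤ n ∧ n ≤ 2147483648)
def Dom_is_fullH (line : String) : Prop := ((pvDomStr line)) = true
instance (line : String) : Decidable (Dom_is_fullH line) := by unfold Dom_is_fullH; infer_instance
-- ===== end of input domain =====

-- B replaces A's frequency dictionary by sorting the characters and scanning contiguous
-- equal runs, testing membership of 3 and 2 in the list of run lengths; same return value.

-- ===== PORT A =====
def is_fullH (line : String) : Bool :=
  let char_counts := line.toList.foldl
    (fun d c => if d.contains c then d.insert c (d.getD c 0 + 1) else d.insert c (1 : Int))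
    PySem.Dict.empty
  decide ((3 : Int) ∈ char_counts.values) && decide ((2 : Int) ∈ char_counts.values)

-- ===== PORT B =====
-- the inner 'while' counting loop of _run_lengths: length of the equal prefix for c
def pvCountRun (c : Char) : List Char → Nat
  | [] => 0
  | x :: xs => if x == c then pvCountRun c xs + 1 else 0

theorem pvCountRun_cons_self (c : Char) (xs : List Char) :
    pvCountRun c (c :: xs) = pvCountRun c xs + 1 := by simp [pvCountRun]

-- _run_lengths: recursion over the runs, dropping each counted run
def pvRunLengths : List Char → List Int
  | [] => []
  | c :: rest =>
      let k := pvCountRun c (c :: rest)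
      ((k : Nat) : Int) :: pvRunLengths ((c :: rest).drop k)
termination_by l => l.length
decreasing_by
  simp only [List.length_drop, List.length_cons, pvCountRun_cons_self]
  omega

def is_fullH_alt (line : String) : Bool :=
  let lengths := pvRunLengths (PySem.List.sorted line.toList (fun x => x) false)
  decide ((3 : Int) ∈ lengths) && decide ((2 : Int) ∈ lengths)

-- ===== PRECONDITION & SPEC =====
def Spec_is_fullH (line : String) (out : Bool) : Prop := out = is_fullH_alt line
instance (line : String) (out : Bool) : Decidable (Spec_is_fullH line out) := by unfold Spec_is_fullH; infer_instance

-- ===== CLAIM (what is proved, stated in full; the proofs are below) =====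
def Claim_equal_is_fullH : Prop := ∀ (line : String), Dom_is_fullH line → Spec_is_fullH line (is_fullH line)

-- ===== LEMMAS AND PROOFS =====

-- A's branchy loop body equals the uniform insert-getD+1 body on every state.
theorem pv_step_eq :
    (fun (d : PySem.Dict Char Int) (c : Char) =>
        if d.contains c then d.insert c (d.getD c 0 + 1) else d.insert c (1 : Int))
    = (fun (d : PySem.Dict Char Int) (c : Char) => d.insert c (d.getD c 0 + 1)) := by
  funext d c
  by_cases h : d.contains c = true
  · simp [h]
  · simp only [Bool.not_eq_true] at h
    simp [h, PySem.Dict.getD_of_not_contains d 0 h]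

theorem pv_fold_eq_counter (cs : List Char) :
    cs.foldl (fun (d : PySem.Dict Char Int) (c : Char) =>
        if d.contains c then d.insert c (d.getD c 0 + 1) else d.insert c (1 : Int))
      PySem.Dict.empty = PySem.Dict.counter cs := by
  rw [pv_step_eq, PySem.Dict.foldl_insert_getD_add_one_eq_counter]

-- membership in counter values ↔ some character occurs exactly k times
theorem pv_mem_values_iff (cs : List Char) (k : Int) :
    (k ∈ (PySem.Dict.counter cs).values) ↔ ∃ c ∈ cs, (cs.count c : Int) = k := by
  have hv : (PySem.Dict.counter cs).values
      = ((PySem.Set.ofList cs).map fun c => ((cs.count c : Int))) := by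
    show ((PySem.Dict.counter cs).items.map (·.2))
        = ((PySem.Set.ofList cs).map fun c => ((cs.count c : Int)))
    rw [PySem.Dict.items_counter]
    simp [List.map_map, Function.comp]
  rw [hv]
  simp only [List.mem_map]
  constructor
  · rintro ⟨c, hc, hk⟩
    exact ⟨c, (PySem.Set.mem_ofList _ _).mp hc, hk⟩
  · rintro ⟨c, hc, hk⟩
    exact ⟨c, (PySem.Set.mem_ofList _ _).mpr hc, hk⟩

-- B side: basic facts about the counted run
theorem pvCountRun_le (c : Char) (l : List Char) : pvCountRun c l ≤ l.length := by
  induction l with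
  | nil => simp [pvCountRun]
  | cons x xs ih =>
    simp only [pvCountRun, List.length_cons]
    split <;> omega

theorem pv_take_countRun_eq (c : Char) (l : List Char) :
    ∀ x ∈ l.take (pvCountRun c l), x = c := by
  induction l with
  | nil => simp
  | cons y ys ih =>
    intro x hx
    simp only [pvCountRun] at hx
    by_cases h : y = c
    · subst h
      simp only [beq_self_eq_true, if_true, List.take_succ_cons, List.mem_cons] at hx
      rcases hx with h | h
      · exact h
      · exact ih x h
    · simp [h] at hx

theorem pv_drop_head_ne (c : Char) (l : List Char) :
    ∀ x xs, l.drop (pvCountRun c l) = x :: xs → x ≠ c := by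
  induction l with
  | nil => intro x xs h; simp at h
  | cons y ys ih =>
    intro x xs h
    simp only [pvCountRun] at h
    by_cases hy : y = c
    · subst hy
      simp only [beq_self_eq_true, if_true, List.drop_succ_cons] at h
      exact ih x xs h
    · have : y ≠ c := hy
      simp only [beq_iff_eq, hy, if_false, List.drop_zero] at h
      cases h; exact hy

-- on a sorted list, no later run contains the head character again
theorem pv_drop_count_zero (c : Char) (l : List Char)
    (hs : l.Pairwise (· ≤ ·)) (hd : l ≠ []) (hc : l.head hd = c) :
    (l.drop (pvCountRun c l)).count c = 0 := by
  cases hdd : l.drop (pvCountRun c l) with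
  | nil => simp
  | cons x xs =>
    have hxc : x ≠ c := pv_drop_head_ne c l x xs hdd
    have hxl : x ∈ l := by
      have : x ∈ l.drop (pvCountRun c l) := by rw [hdd]; exact List.mem_cons_self
      exact List.mem_of_mem_drop this
    -- c ≤ x, x ≠ c ⇒ c < x ; and drop is sorted with head x, so all its elements ≥ x > c
    have hcl : c ≤ x := by
      cases l with
      | nil => exact absurd rfl hd
      | cons h0 t =>
        have h0c : h0 = c := hc
        subst h0c
        rcases List.mem_cons.mp hxl with h | h
        · exact le_of_eq h.symm
        · exact (List.pairwise_cons.mp hs).1 x h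
    have hclt : c < x := lt_of_le_of_ne hcl (fun h => hxc h.symm)
    have hds : (l.drop (pvCountRun c l)).Pairwise (· ≤ ·) :=
      hs.sublist (List.drop_sublist _ _)
    rw [hdd] at hds
    rw [List.count_eq_zero]
    intro hmem
    rcases List.mem_cons.mp hmem with h | h
    · exact hxc h.symm
    · have := (List.pairwise_cons.mp hds).1 c h
      exact absurd (lt_of_lt_of_le hclt this) (lt_irrefl c)

theorem pv_countRun_eq_count (c : Char) (l : List Char)
    (hs : l.Pairwise (· ≤ ·)) (hd : l ≠ []) (hc : l.head hd = c) :
    pvCountRun c l = l.count c := by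
  have hsplit := List.take_append_drop (pvCountRun c l) l
  have hcount : l.count c
      = (l.take (pvCountRun c l)).count c + (l.drop (pvCountRun c l)).count c := by
    conv_lhs => rw [← hsplit]
    exact List.count_append ..
  have htake : (l.take (pvCountRun c l)).count c = pvCountRun c l := by
    have hall : ∀ x ∈ l.take (pvCountRun c l), x = c := pv_take_countRun_eq c l
    have hlen : (l.take (pvCountRun c l)).length = pvCountRun c l := by
      simp [List.length_take, Nat.min_eq_left (pvCountRun_le c l)]
    have := List.count_eq_length.mpr (fun a ha => (hall a ha).symm)
    omega
  rw [hcount, htake, pv_drop_count_zero c l hs hd hc]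
  omega

-- characterisation of run lengths of a sorted list
theorem pvRunLengths_nil : pvRunLengths [] = [] := by rw [pvRunLengths]

theorem pvRunLengths_cons (c : Char) (rest : List Char) :
    pvRunLengths (c :: rest)
      = ((pvCountRun c (c :: rest) : Nat) : Int)
        :: pvRunLengths ((c :: rest).drop (pvCountRun c (c :: rest))) := by
  rw [pvRunLengths]

theorem pv_mem_runLengths (l : List Char) (hs : l.Pairwise (· ≤ ·)) (k : Int) :
    k ∈ pvRunLengths l ↔ ∃ c ∈ l, (l.count c : Int) = k := by
  induction hn : l.length using Nat.strong_induction_on generalizing l with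
  | _ n ih =>
  cases l with
  | nil => simp [pvRunLengths_nil]
  | cons c rest =>
    have hd : (c :: rest) ≠ [] := by simp
    have hcr : pvCountRun c (c :: rest) = (c :: rest).count c :=
      pv_countRun_eq_count c (c :: rest) hs hd rfl
    set k0 := pvCountRun c (c :: rest) with hk0
    set d := (c :: rest).drop k0 with hdd
    have hds : d.Pairwise (· ≤ ·) := hs.sublist (List.drop_sublist _ _)
    have hk0pos : 1 ≤ k0 := by rw [hk0, pvCountRun_cons_self]; omega
    have hdlen : d.length < n := by
      rw [hdd, List.length_drop, List.length_cons]
      rw [List.length_cons] at hn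
      omega
    have hih : k ∈ pvRunLengths d ↔ ∃ x ∈ d, (d.count x : Int) = k :=
      ih d.length hdlen d hds rfl
    have hdc0 : d.count c = 0 := pv_drop_count_zero c (c :: rest) hs hd rfl
    -- every element of d has the same count in l as in d (the dropped prefix is all c's)
    have hprefix : ∀ x, x ≠ c → (c :: rest).count x = d.count x := by
      intro x hx
      have hsplit := List.take_append_drop k0 (c :: rest)
      have heq : (c :: rest).count x
          = ((c :: rest).take k0).count x + d.count x := by
        conv_lhs => rw [← hsplit]
        exact List.count_append ..
      rw [heq]
      have hz : ((c :: rest).take k0).count x = 0 := by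
        rw [List.count_eq_zero]
        intro hmem
        exact hx (pv_take_countRun_eq c (c :: rest) x hmem)
      omega
    have hdne : ∀ x ∈ d, x ≠ c := by
      intro x hx hxe; subst hxe
      exact absurd hx (List.count_eq_zero.mp hdc0)
    have hdmem : ∀ x ∈ d, x ∈ (c :: rest) := fun x hx => List.mem_of_mem_drop (hdd ▸ hx)
    rw [pvRunLengths_cons]
    simp only [List.mem_cons]
    constructor
    · rintro (h | h)
      · exact ⟨c, Or.inl rfl, by rw [← hcr]; omega⟩
      · rcases hih.mp h with ⟨x, hxd, hxk⟩
        exact ⟨x, List.mem_cons.mp (hdmem x hxd), by rw [hprefix x (hdne x hxd)]; exact hxk⟩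
    · rintro ⟨x, hxl, hxk⟩
      by_cases hxc : x = c
      · subst hxc; left; rw [← hxk, ← hcr]
      · right
        apply hih.mpr
        refine ⟨x, ?_, by rw [← hprefix x hxc]; exact hxk⟩
        -- x ∈ l, x ≠ c, so x is not in the all-c prefix: it lies in d
        have hxl' : x ∈ c :: rest := List.mem_cons.mpr hxl
        have hsplit := List.take_append_drop k0 (c :: rest)
        rw [← hsplit] at hxl'
        rcases List.mem_append.mp hxl' with h | h
        · exact absurd (pv_take_countRun_eq c (c :: rest) x h) hxc
        · exact h

-- ===== VERDICT (by name: the statement is the Claim_ definition above) =====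
theorem is_fullH_spec : Claim_equal_is_fullH := by
  intro line _
  show is_fullH line = is_fullH_alt line
  unfold is_fullH is_fullH_alt
  rw [pv_fold_eq_counter]
  set cs := line.toList
  have hperm : (PySem.List.sorted cs (fun x => x) false).Perm cs :=
    PySem.List.sorted_perm ..
  have hs : (PySem.List.sorted cs (fun x => x) false).Pairwise (· ≤ ·) :=
    PySem.List.sorted_pairwise ..
  apply Bool.eq_iff_iff.mpr
  simp only [Bool.and_eq_true, decide_eq_true_iff, pv_mem_values_iff,
    pv_mem_runLengths _ hs]
  constructor <;> rintro ⟨⟨c3, h3m, h3⟩, ⟨c2, h2m, h2⟩⟩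
  · exact ⟨⟨c3, hperm.mem_iff.mpr h3m, by rw [hperm.count_eq]; exact h3⟩,
           ⟨c2, hperm.mem_iff.mpr h2m, by rw [hperm.count_eq]; exact h2⟩⟩
  · exact ⟨⟨c3, hperm.mem_iff.mp h3m, by rw [← hperm.count_eq]; exact h3⟩,
           ⟨c2, hperm.mem_iff.mp h2m, by rw [← hperm.count_eq]; exact h2⟩⟩
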